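-- pv_equiv track=rewrite | github.com/fairuzald/Tubes-1-Stima | src/api/main.py | get_sequences_candidate
-- ===== SOURCE A (Python) =====
-- def get_sequences_candidate(buffer, axis, current_position, col_matrix, row_matrix):
--     # Initialize push stack and result candidate
--     stack = [(buffer, axis, current_position, ())]
--     result = []
--     while stack:
--         # Pop to get the data
--         buffer, axis, current_position, sequence = stack.pop()
--         # Generate possible next moves
--         next_moves = [(i + 1, current_position) if axis == 'x' else (current_position, i + 1) for i in range(col_matrix if axis == 'x' else row_matrix)]
--         # Last buffer attempt
--         if buffer == 1:
--             result.extend([sequence + ((x, y),) for x, y in next_moves if (x, y) not in sequence])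
--         else:
--             for x, y in next_moves:
--                 # Prevent push itself
--                 if (x, y) not in sequence:
--                     stack.append((buffer - 1, ('y' if axis == 'x' else 'x'), (x if axis == 'x' else y), sequence + ((x, y),)))
--
--     return result
-- ===== SOURCE B (Python) =====
-- def get_sequences_candidate(buffer, axis, current_position, col_matrix, row_matrix):
--     # Recursive DFS instead of an explicit stack; internal levels iterate the
--     # valid moves in reverse so the output order matches the LIFO traversal.
--     def recurse(buf, ax, pos, seq):
--         n = col_matrix if ax == 'x' else row_matrix
--         moves = [(i + 1, pos) if ax == 'x' else (pos, i + 1) for i in range(n)]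
--         if buf == 1:
--             return [seq + (m,) for m in moves if m not in seq]
--         return [r for m in reversed(moves) if m not in seq
--                 for r in recurse(buf - 1, 'y' if ax == 'x' else 'x',
--                                  m[0] if ax == 'x' else m[1], seq + (m,))]
--     return recurse(buffer, axis, current_position, ())
-- ===== Notes on version B (the rewrite author's own statement) =====
-- stated objective: alternative
-- what changed: Replaces A's explicit LIFO stack loop with a recursive DFS that returns the completed sequences directly, recursing over the valid moves in reverse at internal levels so the output order matches A's stack traversal.
import Mathlib
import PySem

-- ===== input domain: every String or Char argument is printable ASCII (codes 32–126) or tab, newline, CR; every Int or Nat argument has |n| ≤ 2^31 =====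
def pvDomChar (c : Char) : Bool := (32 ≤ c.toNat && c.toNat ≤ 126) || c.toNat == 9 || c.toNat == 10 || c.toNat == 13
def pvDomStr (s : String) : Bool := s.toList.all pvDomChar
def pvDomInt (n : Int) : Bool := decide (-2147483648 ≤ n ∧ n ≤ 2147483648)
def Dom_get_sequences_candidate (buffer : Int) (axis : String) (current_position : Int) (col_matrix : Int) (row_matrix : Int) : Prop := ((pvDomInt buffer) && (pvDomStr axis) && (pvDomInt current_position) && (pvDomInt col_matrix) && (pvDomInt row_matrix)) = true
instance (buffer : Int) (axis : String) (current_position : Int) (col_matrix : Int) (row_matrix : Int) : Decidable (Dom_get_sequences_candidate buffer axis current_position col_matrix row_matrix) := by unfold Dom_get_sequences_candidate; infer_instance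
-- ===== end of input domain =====

-- B replaces A's explicit LIFO stack by a recursive DFS (internal levels recurse over
-- the valid moves in reverse so the output order is identical); same asymptotic cost.

-- ===== PORT A =====

-- `next_moves` comprehension of A (B computes n first; see pvMovesB, definitionally equal).
def pvMovesA (col row : Int) (axis : String) (cp : Int) : List (Int × Int) :=
  (PySem.List.pyRange 0 (if axis == "x" then col else row) 1).map
    (fun i => if axis == "x" then (i + 1, cp) else (cp, i + 1))

-- Termination infrastructure (not part of the algorithm): every pushed pair lies in the
-- finite universe pvU and is new in the sequence, so the number of unused universe pairs
-- strictly drops along every push / recursive call.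
def pvV (col row c : Int) : Finset Int :=
  (PySem.List.pyRange 1 (col + 1) 1 ++ PySem.List.pyRange 1 (row + 1) 1 ++ [c]).toFinset

lemma mem_pvV (col row c x : Int) :
    x ∈ pvV col row c ↔ (1 ≤ x ∧ x ≤ col) ∨ (1 ≤ x ∧ x ≤ row) ∨ x = c := by
  simp only [pvV, List.mem_toFinset, List.mem_append, PySem.List.mem_pyRange_one,
    List.mem_singleton]
  constructor
  · rintro ((h | h) | h)
    · left; omega
    · right; left; omega
    · right; right; exact h
  · rintro (h | h | h)
    · left; left; omega
    · left; right; omega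
    · right; exact h

def pvU (col row c : Int) : Finset (Int × Int) := (pvV col row c) ×ˢ (pvV col row c)

def pvMu (col row c : Int) (seq : List (Int × Int)) : Nat :=
  ((pvU col row c).filter (fun p => p ∉ seq)).card

lemma pvMove_mem_U (col row : Int) (axis : String) (cp : Int) {m : Int × Int}
    (hm : m ∈ pvMovesA col row axis cp) : m ∈ pvU col row cp := by
  obtain ⟨i, hi, rfl⟩ := List.mem_map.1 hm
  rw [PySem.List.mem_pyRange_one] at hi
  by_cases hx : axis == "x" <;>
    simp_all [pvU, Finset.mem_product, mem_pvV]

lemma pvMove_cp_mem_V (col row : Int) (axis : String) (cp : Int) {m : Int × Int}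
    (hm : m ∈ pvMovesA col row axis cp) :
    (if axis == "x" then m.1 else m.2) ∈ pvV col row cp := by
  obtain ⟨i, hi, rfl⟩ := List.mem_map.1 hm
  rw [PySem.List.mem_pyRange_one] at hi
  by_cases hx : axis == "x" <;> simp_all [mem_pvV]

lemma pvV_subset (col row c c' : Int) (h : c' ∈ pvV col row c) :
    pvV col row c' ⊆ pvV col row c := by
  intro x hx
  rw [mem_pvV] at *
  rcases hx with hx | hx | rfl
  · exact Or.inl hx
  · exact Or.inr (Or.inl hx)
  · exact h

lemma pvMu_lt (col row : Int) (axis : String) (cp : Int) (seq : List (Int × Int))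
    (m : Int × Int) (hm : m ∈ pvMovesA col row axis cp) (hns : m ∉ seq) :
    pvMu col row (if axis == "x" then m.1 else m.2) (seq ++ [m]) < pvMu col row cp seq := by
  have hcV := pvMove_cp_mem_V col row axis cp hm
  have hU' : pvU col row (if axis == "x" then m.1 else m.2) ⊆ pvU col row cp :=
    Finset.product_subset_product (pvV_subset _ _ _ _ hcV) (pvV_subset _ _ _ _ hcV)
  have h1 : pvMu col row (if axis == "x" then m.1 else m.2) (seq ++ [m]) ≤
      ((pvU col row cp).filter (fun p => p ∉ seq ++ [m])).card :=
    Finset.card_le_card (Finset.filter_subset_filter _ hU')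
  have hsub : ((pvU col row cp).filter (fun p => p ∉ seq ++ [m]))
      ⊆ ((pvU col row cp).filter (fun p => p ∉ seq)) := by
    intro p hp
    simp only [Finset.mem_filter, List.mem_append, List.mem_singleton] at *
    exact ⟨hp.1, fun h => hp.2 (Or.inl h)⟩
  have hmem : m ∈ (pvU col row cp).filter (fun p => p ∉ seq) :=
    Finset.mem_filter.2 ⟨pvMove_mem_U col row axis cp hm, hns⟩
  have hnot : m ∉ (pvU col row cp).filter (fun p => p ∉ seq ++ [m]) := by
    simp [Finset.mem_filter]
  have h2 : ((pvU col row cp).filter (fun p => p ∉ seq ++ [m])).card <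
      ((pvU col row cp).filter (fun p => p ∉ seq)).card :=
    Finset.card_lt_card ⟨hsub, fun hc => hnot (hc hmem)⟩
  exact lt_of_le_of_lt h1 h2

-- base of the exponential stack potential
def pvB (col row : Int) : Nat := max col.toNat row.toNat + 2

def pvStackMu (col row : Int) (stack : List (Int × String × Int × List (Int × Int))) : Nat :=
  (stack.map (fun s => pvB col row ^ pvMu col row s.2.2.1 s.2.2.2)).sum

lemma pvFoldl_push {α β : Type} (p : α → Prop) [DecidablePred p] (f : α → β) :
    ∀ (moves : List α) (rest : List β),
      moves.foldl (fun st m => if p m then st else f m :: st) rest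
        = ((moves.filter (fun m => decide (¬ p m))).map f).reverse ++ rest := by
  intro moves
  induction moves with
  | nil => intro rest; simp
  | cons m ms ih =>
    intro rest
    by_cases hp : p m <;> simp [List.foldl_cons, hp, ih]

lemma pvStackMu_append (col row : Int)
    (l r : List (Int × String × Int × List (Int × Int))) :
    pvStackMu col row (l ++ r) = pvStackMu col row l + pvStackMu col row r := by
  simp [pvStackMu]

lemma pvStackMu_cons (col row buffer : Int) (axis : String) (cp : Int)
    (seq : List (Int × Int)) (rest : List (Int × String × Int × List (Int × Int))) :
    pvStackMu col row ((buffer, axis, cp, seq) :: rest)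
      = pvB col row ^ pvMu col row cp seq + pvStackMu col row rest := by
  simp [pvStackMu]

lemma pvStackMu_le (col row : Int) (k : Nat)
    (st : List (Int × String × Int × List (Int × Int)))
    (h : ∀ s ∈ st, pvMu col row s.2.2.1 s.2.2.2 ≤ k) :
    pvStackMu col row st ≤ st.length * pvB col row ^ k := by
  induction st with
  | nil => simp [pvStackMu]
  | cons a st ih =>
    have ha : pvB col row ^ pvMu col row a.2.2.1 a.2.2.2 ≤ pvB col row ^ k :=
      Nat.pow_le_pow_right (by simp [pvB]) (h a (List.mem_cons_self))
    have hst := ih (fun s hs => h s (List.mem_cons_of_mem a hs))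
    calc pvStackMu col row (a :: st)
        = pvB col row ^ pvMu col row a.2.2.1 a.2.2.2 + pvStackMu col row st := by
          simp [pvStackMu]
      _ ≤ pvB col row ^ k + st.length * pvB col row ^ k :=
          Nat.add_le_add ha hst
      _ = (st.length + 1) * pvB col row ^ k := by ring
      _ = (a :: st).length * pvB col row ^ k := by simp

lemma pvStackMu_push (col row : Int) (buffer : Int) (axis : String) (cp : Int)
    (seq : List (Int × Int)) (rest : List (Int × String × Int × List (Int × Int))) :
    pvStackMu col row ((pvMovesA col row axis cp).foldl
        (fun st m => if m ∈ seq then st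
          else (buffer - 1, (if axis == "x" then "y" else "x"),
                (if axis == "x" then m.1 else m.2), seq ++ [m]) :: st) rest)
      < pvB col row ^ pvMu col row cp seq + pvStackMu col row rest := by
  rw [pvFoldl_push (fun m => m ∈ seq)
    (fun m => (buffer - 1, (if axis == "x" then "y" else "x"),
               (if axis == "x" then m.1 else m.2), seq ++ [m])), pvStackMu_append]
  apply Nat.add_lt_add_right
  have hb2 : 2 ≤ pvB col row := by simp [pvB]
  have hbpos : 0 < pvB col row := Nat.lt_of_lt_of_le Nat.zero_lt_two hb2
  have hL : ∀ m ∈ (pvMovesA col row axis cp).filter (fun m => decide (m ∉ seq)),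
      m ∈ pvMovesA col row axis cp ∧ m ∉ seq := by
    intro m hm
    rw [List.mem_filter] at hm
    exact ⟨hm.1, by simpa using hm.2⟩
  by_cases hmu : pvMu col row cp seq = 0
  · -- no unused universe pair: every move is already in seq, nothing is pushed
    have hnil : (pvMovesA col row axis cp).filter (fun m => decide (m ∉ seq)) = [] := by
      rw [List.filter_eq_nil_iff]
      intro m hm hdec
      have hmemf : m ∈ (pvU col row cp).filter (fun p => p ∉ seq) :=
        Finset.mem_filter.2 ⟨pvMove_mem_U col row axis cp hm, by simpa using hdec⟩
      have hpos := Finset.card_pos.2 ⟨m, hmemf⟩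
      exact absurd hmu (Nat.pos_iff_ne_zero.mp hpos)
    rw [hnil]
    have h0 : pvStackMu col row ((List.map (fun m : Int × Int =>
        ((buffer - 1 : Int), (if axis == "x" then "y" else "x"),
         (if axis == "x" then m.1 else m.2), seq ++ [m])) []).reverse) = 0 := by
      simp [pvStackMu]
    rw [h0]
    exact Nat.pow_pos hbpos
  · -- at least one unused pair: μ ≥ 1, each pushed child has potential ≤ b^(μ-1),
    -- and there are at most b-2 children
    have hmu1 : 1 ≤ pvMu col row cp seq := Nat.one_le_iff_ne_zero.mpr hmu
    set L := (pvMovesA col row axis cp).filter (fun m => decide (m ∉ seq)) with hLdef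
    set f := fun m : Int × Int => ((buffer - 1 : Int), (if axis == "x" then "y" else "x"),
      (if axis == "x" then m.1 else m.2), seq ++ [m]) with hfdef
    have hmap : ∀ s ∈ (L.map f).reverse,
        pvMu col row s.2.2.1 s.2.2.2 ≤ pvMu col row cp seq - 1 := by
      intro s hs
      rw [List.mem_reverse] at hs
      obtain ⟨m, hmL, rfl⟩ := List.mem_map.1 hs
      obtain ⟨hmm, hmns⟩ := hL m hmL
      have hlt := pvMu_lt col row axis cp seq m hmm hmns
      simp only [hfdef]
      exact Nat.le_sub_one_of_lt hlt
    have hsum : pvStackMu col row ((L.map f).reverse)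
        ≤ ((L.map f).reverse).length * pvB col row ^ (pvMu col row cp seq - 1) :=
      pvStackMu_le col row (pvMu col row cp seq - 1) ((L.map f).reverse) hmap
    have hlen : ((L.map f).reverse).length ≤ pvB col row - 2 := by
      rw [List.length_reverse, List.length_map]
      have h1 : L.length ≤ (pvMovesA col row axis cp).length :=
        hLdef ▸ List.length_filter_le _ _
      have h2 : (pvMovesA col row axis cp).length
          = (if axis == "x" then col else row).toNat := by
        simp [pvMovesA, PySem.List.length_pyRange_one]
      rw [h2] at h1
      have hB : pvB col row - 2 = max col.toNat row.toNat := by simp [pvB]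
      rw [hB]
      have hcr : (if axis == "x" then col else row) = col ∨
          (if axis == "x" then col else row) = row := by
        by_cases hx : axis == "x" <;> simp [hx]
      rcases hcr with h | h <;> rw [h] at h1
      · exact le_trans h1 (Nat.le_max_left _ _)
      · exact le_trans h1 (Nat.le_max_right _ _)
    have hpos : 0 < pvB col row ^ (pvMu col row cp seq - 1) := Nat.pow_pos hbpos
    calc pvStackMu col row ((L.map f).reverse)
        ≤ ((L.map f).reverse).length * pvB col row ^ (pvMu col row cp seq - 1) := hsum
      _ ≤ (pvB col row - 2) * pvB col row ^ (pvMu col row cp seq - 1) :=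
          Nat.mul_le_mul_right _ hlen
      _ < pvB col row * pvB col row ^ (pvMu col row cp seq - 1) :=
          mul_lt_mul_of_pos_right (Nat.sub_lt hbpos Nat.zero_lt_two) hpos
      _ = pvB col row ^ (pvMu col row cp seq - 1 + 1) := by ring
      _ = pvB col row ^ pvMu col row cp seq := by rw [Nat.sub_add_cancel hmu1]

lemma pvStackMu_pop (col row buffer : Int) (axis : String) (cp : Int)
    (seq : List (Int × Int)) (rest : List (Int × String × Int × List (Int × Int))) :
    pvStackMu col row rest < pvStackMu col row ((buffer, axis, cp, seq) :: rest) := by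
  rw [pvStackMu_cons]
  exact Nat.lt_add_of_pos_left (Nat.pow_pos (by simp [pvB]))

lemma pvStackMu_push' (col row : Int) (buffer : Int) (axis : String) (cp : Int)
    (seq : List (Int × Int)) (rest : List (Int × String × Int × List (Int × Int))) :
    pvStackMu col row ((pvMovesA col row axis cp).foldl
        (fun st m => if m ∈ seq then st
          else (buffer - 1, (if axis == "x" then "y" else "x"),
                (if axis == "x" then m.1 else m.2), seq ++ [m]) :: st) rest)
      < pvStackMu col row ((buffer, axis, cp, seq) :: rest) := by
  rw [pvStackMu_cons]
  exact pvStackMu_push col row buffer axis cp seq rest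

-- A: explicit stack (list head = Python stack top); pop, then either collect (buffer==1)
-- or push every unseen move (the foldl over the moves = Python's append loop).
def pvLoopA (col row : Int) (stack : List (Int × String × Int × List (Int × Int)))
    (result : List (List (Int × Int))) : List (List (Int × Int)) :=
  match stack with
  | [] => result
  | (buffer, axis, cp, seq) :: rest =>
    let moves := pvMovesA col row axis cp
    if buffer == 1 then
      pvLoopA col row rest
        (result ++ (moves.filter (fun m => decide (m ∉ seq))).map (fun m => seq ++ [m]))
    else
      pvLoopA col row
        (moves.foldl (fun st m => if m ∈ seq then st
          else (buffer - 1, (if axis == "x" then "y" else "x"),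
                (if axis == "x" then m.1 else m.2), seq ++ [m]) :: st) rest)
        result
termination_by pvStackMu col row stack
decreasing_by
  · exact pvStackMu_pop col row buffer axis cp seq rest
  · exact pvStackMu_push' col row buffer axis cp seq rest

def get_sequences_candidate (buffer : Int) (axis : String) (current_position : Int) (col_matrix : Int) (row_matrix : Int) : List (List (Int × Int)) :=
  pvLoopA col_matrix row_matrix [(buffer, axis, current_position, [])] []

-- ===== PORT B =====

-- B's `moves` (computes n first, then the comprehension)
def pvMovesB (col row : Int) (axis : String) (cp : Int) : List (Int × Int) :=
  let n := if axis == "x" then col else row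
  (PySem.List.pyRange 0 n 1).map (fun i => if axis == "x" then (i + 1, cp) else (cp, i + 1))

lemma pvMovesB_eq (col row : Int) (axis : String) (cp : Int) :
    pvMovesB col row axis cp = pvMovesA col row axis cp := rfl

lemma pvRecB_dec (col row : Int) (axis : String) (cp : Int) (seq : List (Int × Int))
    (m : Int × Int)
    (hm : m ∈ (pvMovesB col row axis cp).reverse.filter (fun m => decide (m ∉ seq))) :
    pvMu col row (if axis == "x" then m.1 else m.2) (seq ++ [m]) < pvMu col row cp seq := by
  rw [List.mem_filter, List.mem_reverse] at hm
  exact pvMu_lt col row axis cp seq m (pvMovesB_eq col row axis cp ▸ hm.1)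
    (by simpa using hm.2)

-- recursive DFS; internal levels traverse the valid moves in reverse
def pvRecB (col row : Int) (buffer : Int) (axis : String) (cp : Int)
    (seq : List (Int × Int)) : List (List (Int × Int)) :=
  let moves := pvMovesB col row axis cp
  if buffer == 1 then
    (moves.filter (fun m => decide (m ∉ seq))).map (fun m => seq ++ [m])
  else
    ((moves.reverse.filter (fun m => decide (m ∉ seq))).attach.map
      (fun x => pvRecB col row (buffer - 1) (if axis == "x" then "y" else "x")
        (if axis == "x" then x.1.1 else x.1.2) (seq ++ [x.1]))).flatten
termination_by pvMu col row cp seq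
decreasing_by
  exact pvRecB_dec col row axis cp seq x.1 x.2

def get_sequences_candidate_alt (buffer : Int) (axis : String) (current_position : Int) (col_matrix : Int) (row_matrix : Int) : List (List (Int × Int)) :=
  pvRecB col_matrix row_matrix buffer axis current_position []

-- ===== PRECONDITION & SPEC =====
def Spec_get_sequences_candidate (buffer : Int) (axis : String) (current_position : Int) (col_matrix : Int) (row_matrix : Int) (out : List (List (Int × Int))) : Prop := out = get_sequences_candidate_alt buffer axis current_position col_matrix row_matrix
instance (buffer : Int) (axis : String) (current_position : Int) (col_matrix : Int) (row_matrix : Int) (out : List (List (Int × Int))) : Decidable (Spec_get_sequences_candidate buffer axis current_position col_matrix row_matrix out) := by unfold Spec_get_sequences_candidate; infer_instance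

-- ===== CLAIM (what is proved, stated in full; the proofs are below) =====
def Claim_equal_get_sequences_candidate : Prop := ∀ (buffer : Int) (axis : String) (current_position : Int) (col_matrix : Int) (row_matrix : Int), Dom_get_sequences_candidate buffer axis current_position col_matrix row_matrix → Spec_get_sequences_candidate buffer axis current_position col_matrix row_matrix (get_sequences_candidate buffer axis current_position col_matrix row_matrix)

-- ===== LEMMAS AND PROOFS =====

def pvFlat (col row : Int) (stack : List (Int × String × Int × List (Int × Int))) :
    List (List (Int × Int)) :=
  (stack.map (fun s => pvRecB col row s.1 s.2.1 s.2.2.1 s.2.2.2)).flatten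

lemma pvFlat_cons (col row b : Int) (a : String) (c : Int) (sq : List (Int × Int))
    (rest : List (Int × String × Int × List (Int × Int))) :
    pvFlat col row ((b, a, c, sq) :: rest) = pvRecB col row b a c sq ++ pvFlat col row rest := by
  simp [pvFlat]

lemma pvFlat_append (col row : Int) (l r : List (Int × String × Int × List (Int × Int))) :
    pvFlat col row (l ++ r) = pvFlat col row l ++ pvFlat col row r := by
  simp [pvFlat]

lemma pvLoopA_flat (col row : Int) :
    ∀ (stack : List (Int × String × Int × List (Int × Int)))
      (res : List (List (Int × Int))),
      pvLoopA col row stack res = res ++ pvFlat col row stack := by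
  intro stack res
  induction stack, res using pvLoopA.induct col row with
  | case1 res => simp [pvLoopA, pvFlat]
  | case2 res buffer axis cp seq rest moves hbuf ih =>
    rw [pvLoopA, if_pos hbuf, ih, pvFlat_cons, pvRecB, if_pos hbuf]
    simp only [pvMovesB_eq, List.append_assoc]
    rfl
  | case3 res buffer axis cp seq rest moves hbuf ih =>
    have ih' : pvLoopA col row
        ((pvMovesA col row axis cp).foldl (fun st m => if m ∈ seq then st
          else (buffer - 1, (if axis == "x" then "y" else "x"),
                (if axis == "x" then m.1 else m.2), seq ++ [m]) :: st) rest) res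
        = res ++ pvFlat col row
          ((pvMovesA col row axis cp).foldl (fun st m => if m ∈ seq then st
            else (buffer - 1, (if axis == "x" then "y" else "x"),
                  (if axis == "x" then m.1 else m.2), seq ++ [m]) :: st) rest) := ih
    rw [pvLoopA, if_neg hbuf, ih',
      pvFoldl_push (fun m => m ∈ seq)
        (fun m => ((buffer - 1 : Int), (if axis == "x" then "y" else "x"),
                   (if axis == "x" then m.1 else m.2), seq ++ [m])),
      pvFlat_append, pvFlat_cons, pvRecB, if_neg hbuf]
    rw [pvMovesB_eq, List.filter_reverse]
    rw [List.attach_map_val (l := (List.filter (fun m => decide (m ∉ seq))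
          (pvMovesA col row axis cp)).reverse)
        (f := fun m : Int × Int => pvRecB col row (buffer - 1)
          (if axis == "x" then "y" else "x")
          (if axis == "x" then m.1 else m.2) (seq ++ [m]))]
    simp [pvFlat, List.map_map, List.map_reverse]
    rfl

theorem pv_main (buffer : Int) (axis : String) (cp col row : Int) :
    get_sequences_candidate buffer axis cp col row
      = get_sequences_candidate_alt buffer axis cp col row := by
  unfold get_sequences_candidate get_sequences_candidate_alt
  rw [pvLoopA_flat]
  simp [pvFlat]

-- ===== VERDICT (by name: the statement is the Claim_ definition above) =====
theorem get_sequences_candidate_spec : Claim_equal_get_sequences_candidate := by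
  intro buffer axis cp col row _
  unfold Spec_get_sequences_candidate
  exact pv_main buffer axis cp col row
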